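-- pv_equiv track=rewrite | github.com/Egecan33/mechabell_builder | mechabellum_builder.py | rank_counters
-- ===== SOURCE A (Python) =====
-- from collections import Counter
-- from typing import Dict, List, Optional
--
-- TIER_RANK = {"S": 4, "A": 3, "B": 2, "C": 1, "D": 0}
--
-- def tier_val(name: str, tiers: Dict[str, str]) -> int:
--     return TIER_RANK.get(tiers.get(name, ""), -1)
--
-- def rank_counters(enemy: List[str], data: Dict[str, Dict], tiers: Dict[str, str]):
--     tally = Counter()
--     for e in enemy:
--         for c in data.get(e, {}).get("countered_by", []):
--             tally[c] += 1
--     for e in enemy: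
--         tally.pop(e, None)
--     return sorted(
--         tally.items(), key=lambda kv: (-kv[1], -tier_val(kv[0], tiers), kv[0])
--     )
-- ===== SOURCE B (Python) =====
-- TIER_RANK = {"S": 4, "A": 3, "B": 2, "C": 1, "D": 0}
--
-- def tier_val(name, tiers):
--     return TIER_RANK.get(tiers.get(name, ""), -1)
--
-- def rank_counters(enemy, data, tiers):
--     # Transposed counting: flatten all counter lists once, then count per
--     # distinct candidate with list.count; ordering by repeated min-extraction
--     # (selection) instead of sorted().
--     flat = []
--     for e in enemy:
--         flat.extend(data.get(e, {}).get("countered_by", []))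
--     cands = [c for c in dict.fromkeys(flat) if c not in enemy]
--     items = [(c, flat.count(c)) for c in cands]
--     out = []
--     while items:
--         best = min(items, key=lambda kv: (-kv[1], -tier_val(kv[0], tiers), kv[0]))
--         items.remove(best)
--         out.append(best)
--     return out
-- ===== Notes on version B (the rewrite author's own statement) =====
-- stated objective: alternative
-- what changed: A's incremental Counter tally followed by a pop loop and sorted() is replaced by a transposed computation: flatten all countered_by lists once, count each distinct non-enemy candidate with list.count, and produce the order by repeated min-extraction (selection) instead of a library sort. Pre_ only excludes association lists that denote no Python dict (a duplicated key in data/tiers or a duplicated countered_by entry), where first-match lookup is an arbitrary choice; every real Python dict input satisfies it.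
import Mathlib
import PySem

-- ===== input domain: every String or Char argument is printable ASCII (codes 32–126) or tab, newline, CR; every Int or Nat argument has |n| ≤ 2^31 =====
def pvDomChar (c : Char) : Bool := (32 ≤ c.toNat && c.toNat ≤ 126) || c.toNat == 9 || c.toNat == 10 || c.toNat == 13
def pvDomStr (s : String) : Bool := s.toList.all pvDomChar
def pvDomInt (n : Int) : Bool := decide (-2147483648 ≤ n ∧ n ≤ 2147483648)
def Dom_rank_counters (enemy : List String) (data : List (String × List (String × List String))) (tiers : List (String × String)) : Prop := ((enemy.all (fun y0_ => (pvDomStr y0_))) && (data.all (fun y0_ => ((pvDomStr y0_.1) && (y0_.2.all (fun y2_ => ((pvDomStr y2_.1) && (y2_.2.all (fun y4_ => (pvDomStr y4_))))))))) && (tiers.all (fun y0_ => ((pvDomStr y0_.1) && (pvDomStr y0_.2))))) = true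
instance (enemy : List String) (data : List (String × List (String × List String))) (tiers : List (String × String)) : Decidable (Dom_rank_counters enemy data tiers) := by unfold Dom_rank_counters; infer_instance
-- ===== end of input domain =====

-- B replaces A's incremental Counter tally + pop loop + library sort by a transposed
-- computation: flatten the counter lists once, count each distinct non-enemy candidate
-- with list.count, and order the result by repeated min-extraction (selection) instead
-- of sorted(). Objective: alternative (different algorithm, same return value).

-- ===== PORT A =====
-- TIER_RANK = {"S": 4, "A": 3, "B": 2, "C": 1, "D": 0}
def TIER_RANK : PySem.Dict String Int :=
  PySem.Dict.ofList [("S", 4), ("A", 3), ("B", 2), ("C", 1), ("D", 0)]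

-- tier_val(name, tiers) = TIER_RANK.get(tiers.get(name, ""), -1)
def tier_val (name : String) (tiers : List (String × String)) : Int :=
  TIER_RANK.getD ((PySem.Dict.mk tiers).getD name "") (-1)

-- the Python key lambda kv: (-kv[1], -tier_val(kv[0], tiers), kv[0]); the tuple is
-- compared lexicographically in Python, which is exactly the Lex order on
-- Int ×ₗ (Int ×ₗ String) (Lean's String '<' = Python's on the printable-ASCII domain).
-- Shared by both ports because both Pythons use this same key expression.
def pvKey (tiers : List (String × String)) (kv : String × Int) : Int ×ₗ (Int ×ₗ String) :=
  toLex (-kv.2, toLex (-(tier_val kv.1 tiers), kv.1))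

def rank_counters (enemy : List String) (data : List (String × List (String × List String))) (tiers : List (String × String)) : List (String × Int) :=
  -- tally = Counter(); for e in enemy: for c in data.get(e, {}).get("countered_by", []): tally[c] += 1
  let tally := enemy.foldl (fun tally e =>
    ((PySem.Dict.mk ((PySem.Dict.mk data).getD e [])).getD "countered_by" []).foldl
      (fun tally c => tally.modify c 0 (· + 1)) tally) PySem.Dict.empty
  -- for e in enemy: tally.pop(e, None)
  let tally := enemy.foldl (fun tally e => tally.erase e) tally
  -- sorted(tally.items(), key=…)
  PySem.List.sorted tally.items (pvKey tiers) false

-- ===== PORT B =====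
-- while items: best = min(items, key=…); items.remove(best); out.append(best)
-- (fuel = initial length of items; min over a nonempty list always succeeds,
-- remove of an element returned by min always succeeds)
def selExtract (tiers : List (String × String)) : Nat → List (String × Int) → List (String × Int)
  | 0, _ => []
  | n + 1, items =>
    match PySem.List.min? items (pvKey tiers) with
    | none => []
    | some best =>
      match PySem.List.remove? items best with
      | none => []
      | some rest => best :: selExtract tiers n rest

def rank_counters_alt (enemy : List String) (data : List (String × List (String × List String))) (tiers : List (String × String)) : List (String × Int) :=
  -- flat = []; for e in enemy: flat.extend(data.get(e, {}).get("countered_by", []))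
  let flat := enemy.foldl (fun acc e =>
    acc ++ (PySem.Dict.mk ((PySem.Dict.mk data).getD e [])).getD "countered_by" []) []
  -- cands = [c for c in dict.fromkeys(flat) if c not in enemy]
  let cands := (PySem.List.dedup flat).filter (fun c => !enemy.contains c)
  -- items = [(c, flat.count(c)) for c in cands]
  let items := cands.map (fun c => (c, (PySem.List.count flat c : Int)))
  selExtract tiers items.length items

-- ===== PRECONDITION & SPEC =====
-- Pre_ excludes only association lists that denote no Python dict where A reads them — a
-- duplicated key in data or tiers, or a duplicated "countered_by" entry inside a value of data:
-- a Python dict cannot repeat a key, so first-match lookup on such a list is an arbitrary choice.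
def Pre_rank_counters (enemy : List String) (data : List (String × List (String × List String))) (tiers : List (String × String)) : Prop :=
  (data.map Prod.fst).Nodup ∧ (tiers.map Prod.fst).Nodup ∧
  ∀ p ∈ data, (p.2.filter (fun q => q.1 == "countered_by")).length ≤ 1
instance (enemy : List String) (data : List (String × List (String × List String))) (tiers : List (String × String)) : Decidable (Pre_rank_counters enemy data tiers) := by unfold Pre_rank_counters; infer_instance

def pvWitness_rank_counters : List String × (List (String × List (String × List String))) × (List (String × String)) :=
  (["foo", "bar"],
   [("foo", [("countered_by", ["baz", "bar", "baz"])]), ("qux", [("countered_by", ["zap"])])],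
   [("baz", "A"), ("bar", "S")])

def Spec_rank_counters (enemy : List String) (data : List (String × List (String × List String))) (tiers : List (String × String)) (out : List (String × Int)) : Prop := out = rank_counters_alt enemy data tiers
instance (enemy : List String) (data : List (String × List (String × List String))) (tiers : List (String × String)) (out : List (String × Int)) : Decidable (Spec_rank_counters enemy data tiers out) := by unfold Spec_rank_counters; infer_instance

-- ===== CLAIM (what is proved, stated in full; the proofs are below) =====
def Claim_equal_rank_counters : Prop := ∀ (enemy : List String) (data : List (String × List (String × List String))) (tiers : List (String × String)), Dom_rank_counters enemy data tiers → Pre_rank_counters enemy data tiers → Spec_rank_counters enemy data tiers (rank_counters enemy data tiers)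

-- ===== LEMMAS AND PROOFS =====

-- the key is injective: its last component is the name, its first the negated count
lemma pvKey_injective (tiers : List (String × String)) : Function.Injective (pvKey tiers) := by
  intro a b h
  have h' := congrArg ofLex h
  have h1 : -a.2 = -b.2 := congrArg Prod.fst h'
  have h2 := congrArg (fun p => (ofLex p.2).2) h'
  simp at h2
  exact Prod.ext h2 (by omega)

-- popping every enemy = filtering the items list (Dict.erase is a filter on items)
lemma items_foldl_erase {ν : Type} (enemy : List String) (d : PySem.Dict String ν) :
    (enemy.foldl (fun d e => d.erase e) d).items
      = d.items.filter (fun p => !enemy.contains p.1) := by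
  induction enemy generalizing d with
  | nil => simp
  | cons e rest ih =>
      rw [List.foldl_cons, ih]
      show ((d.erase e).items).filter _ = _
      simp only [PySem.Dict.erase, List.filter_filter]
      apply List.filter_congr
      intro p _
      by_cases h : p.1 = e <;> simp [h]

-- the selection loop, run with fuel = length on a duplicate-free list, produces a
-- permutation of the list that is strictly increasing in the key
lemma selExtract_spec (tiers : List (String × String)) :
    ∀ (n : Nat) (items : List (String × Int)), items.Nodup → n = items.length →
      (selExtract tiers n items).Perm items ∧
      (selExtract tiers n items).Pairwise (fun a b => pvKey tiers a < pvKey tiers b) := by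
  intro n
  induction n with
  | zero =>
      intro items _ hlen
      have : items = [] := List.eq_nil_of_length_eq_zero hlen.symm
      subst this; simp [selExtract]
  | succ n ih =>
      intro items hnd hlen
      have hne : items ≠ [] := by intro h; subst h; simp at hlen
      obtain ⟨best, hmin⟩ : ∃ b, PySem.List.min? items (pvKey tiers) = some b := by
        cases h : PySem.List.min? items (pvKey tiers) with
        | none => exact absurd ((PySem.List.min?_eq_none_iff items (pvKey tiers)).mp h) hne
        | some b => exact ⟨b, rfl⟩
      have hmem : best ∈ items := PySem.List.min?_mem hmin
      have hrem : PySem.List.remove? items best = some (items.erase best) :=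
        PySem.List.remove?_eq_some_erase items best hmem
      have hlen' : n = (items.erase best).length := by
        have := items.length_erase_of_mem hmem; omega
      have hnd' : (items.erase best).Nodup := hnd.erase best
      obtain ⟨ihp, ihpw⟩ := ih (items.erase best) hnd' hlen'
      have hsel : selExtract tiers (n + 1) items
          = best :: selExtract tiers n (items.erase best) := by
        simp [selExtract, hmin, hrem]
      constructor
      · rw [hsel]
        exact (ihp.cons best).trans (List.perm_cons_erase hmem).symm
      · rw [hsel]
        refine List.pairwise_cons.mpr ⟨?_, ihpw⟩
        intro y hy
        have hy' : y ∈ items.erase best := ihp.mem_iff.mp hy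
        have hyne : y ≠ best := by
          have := (List.Nodup.mem_erase_iff hnd).mp hy'
          exact this.1
        have hle : pvKey tiers best ≤ pvKey tiers y :=
          PySem.List.min?_isMin hmin y (List.mem_of_mem_erase hy')
        exact lt_of_le_of_ne hle (fun h => hyne (pvKey_injective tiers h).symm)

-- A's post-pop items list IS B's candidate/count list
lemma items_eq (enemy : List String) (data : List (String × List (String × List String))) :
    (enemy.foldl (fun d e => d.erase e)
        (enemy.foldl (fun tally e =>
          ((PySem.Dict.mk ((PySem.Dict.mk data).getD e [])).getD "countered_by" []).foldl
            (fun tally c => tally.modify c 0 (· + 1)) tally) (PySem.Dict.empty : PySem.Dict String Int))).items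
      = ((PySem.List.dedup (enemy.foldl (fun acc e =>
            acc ++ (PySem.Dict.mk ((PySem.Dict.mk data).getD e [])).getD "countered_by" []) [])).filter
          (fun c => !enemy.contains c)).map
        (fun c => (c, (PySem.List.count (enemy.foldl (fun acc e =>
            acc ++ (PySem.Dict.mk ((PySem.Dict.mk data).getD e [])).getD "countered_by" []) []) c : Int))) := by
  rw [PySem.List.foldl_append_eq_flatMap]
  have hA : (enemy.foldl (fun tally e =>
        ((PySem.Dict.mk ((PySem.Dict.mk data).getD e [])).getD "countered_by" []).foldl
          (fun tally c => tally.modify c 0 (· + 1)) tally) (PySem.Dict.empty : PySem.Dict String Int))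
      = PySem.Dict.counter (enemy.flatMap (fun e =>
          (PySem.Dict.mk ((PySem.Dict.mk data).getD e [])).getD "countered_by" [])) := by
    rw [PySem.Dict.counter_eq_foldl, List.foldl_flatMap]
  rw [hA, items_foldl_erase, PySem.Dict.items_counter, List.filter_map, List.nil_append]
  simp only [PySem.List.dedup_eq_ofList, PySem.List.count_eq]
  rfl

-- ===== VERDICT (by name: the statement is the Claim_ definition above) =====
theorem rank_counters_spec : Claim_equal_rank_counters := by
  intro enemy data tiers _ _
  show PySem.List.sorted _ _ _ = _
  rw [items_eq enemy data]
  set flat := enemy.foldl (fun acc e =>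
    acc ++ (PySem.Dict.mk ((PySem.Dict.mk data).getD e [])).getD "countered_by" []) [] with hflat
  set items := ((PySem.List.dedup flat).filter (fun c => !enemy.contains c)).map
    (fun c => (c, (PySem.List.count flat c : Int))) with hitems
  have hnd : items.Nodup := by
    apply List.Nodup.map
    · intro a b h; exact congrArg Prod.fst h
    · exact (PySem.List.nodup_dedup flat).filter _
  obtain ⟨hperm, hpw⟩ := selExtract_spec tiers items.length items hnd rfl
  exact (PySem.List.sorted_eq_of_perm_of_pairwise_lt items _ (pvKey tiers) hperm hpw).symm ▸ rfl
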